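-- pv_equiv track=rewrite | github.com/danzhechen/LedgerFlow | src/veritas_accounting/validation/auto_fix.py | _is_likely_typo
-- ===== SOURCE A (Python) =====
-- def _is_likely_typo(actual: str, expected: str) -> bool:
--     """
--     Check if actual value is a likely typo of expected value.
--
--     Common typo patterns: O/0, I/1, S/5, etc.
--
--     Args:
--         actual: Actual value
--         expected: Expected value
--
--     Returns:
--         True if likely typo, False otherwise
--     """
--     # Common typo character pairs
--     typo_pairs = [
--         ("0", "O"),
--         ("O", "0"),
--         ("1", "I"),
--         ("I", "1"),
--         ("5", "S"),
--         ("S", "5"),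
--         ("Z", "2"),
--         ("2", "Z"),
--     ]
--
--     for i, (a_char, e_char) in enumerate(zip(actual, expected)):
--         if a_char != e_char:
--             if (a_char, e_char) in typo_pairs:
--                 # Check if rest of string matches
--                 if actual[:i] + actual[i + 1 :] == expected[:i] + expected[i + 1 :]:
--                     return True
--
--     return False
-- ===== SOURCE B (Python) =====
-- def _is_likely_typo(actual: str, expected: str) -> bool:
--     """Single pass: equal lengths, exactly one mismatch, and it is a typo pair."""
--     if len(actual) != len(expected):
--         return False
--     typo_set = {
--         ("0", "O"), ("O", "0"),
--         ("1", "I"), ("I", "1"),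
--         ("5", "S"), ("S", "5"),
--         ("Z", "2"), ("2", "Z"),
--     }
--     diffs = [(a, e) for a, e in zip(actual, expected) if a != e]
--     return len(diffs) == 1 and diffs[0] in typo_set
-- ===== Notes on version B (the rewrite author's own statement) =====
-- stated objective: faster
-- what changed: Instead of re-slicing and comparing whole remainder strings at every mismatch, B makes one pass collecting the mismatching character pairs and returns True iff lengths are equal, there is exactly one mismatch, and that pair is a known typo pair.
import Mathlib
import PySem

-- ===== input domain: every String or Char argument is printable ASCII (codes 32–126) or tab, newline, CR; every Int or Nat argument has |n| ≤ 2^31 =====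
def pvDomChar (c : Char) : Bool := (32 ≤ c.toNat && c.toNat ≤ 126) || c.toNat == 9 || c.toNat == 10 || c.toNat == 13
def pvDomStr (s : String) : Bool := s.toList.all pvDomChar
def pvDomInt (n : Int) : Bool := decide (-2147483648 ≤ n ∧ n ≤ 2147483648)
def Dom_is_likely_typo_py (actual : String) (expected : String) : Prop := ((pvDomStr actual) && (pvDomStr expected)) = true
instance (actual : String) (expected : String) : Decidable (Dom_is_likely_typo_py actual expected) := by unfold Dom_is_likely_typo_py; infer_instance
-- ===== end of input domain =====

-- B replaces A's per-mismatch remainder-string slicing/comparison by a single pass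
-- collecting the mismatching pairs (objective: faster; measured faster in a timing run).

-- ===== PORT A =====
-- A's typo_pairs list
def typoPairsA : List (Char × Char) :=
  [('0','O'), ('O','0'), ('1','I'), ('I','1'), ('5','S'), ('S','5'), ('Z','2'), ('2','Z')]

-- the `for i, (a_char, e_char) in enumerate(zip(actual, expected))` loop;
-- `actual[:i] + actual[i+1:]` is `a.take i ++ a.drop (i+1)` (slices with 0 ≤ i are exact here)
def typoLoopA (a e : List Char) : Nat → List Char → List Char → Bool
  | _, [], _ => false
  | _, _, [] => false
  | i, ac :: as, ec :: es =>
    (decide (ac ≠ ec) && decide ((ac, ec) ∈ typoPairsA) &&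
      decide (a.take i ++ a.drop (i+1) = e.take i ++ e.drop (i+1)))
    || typoLoopA a e (i+1) as es

def is_likely_typo_py (actual : String) (expected : String) : Bool :=
  typoLoopA actual.toList expected.toList 0 actual.toList expected.toList

-- ===== PORT B =====
-- B's typo_set (a Python set literal of distinct pairs; membership only)
def typoSetB : List (Char × Char) :=
  [('0','O'), ('O','0'), ('1','I'), ('I','1'), ('5','S'), ('S','5'), ('Z','2'), ('2','Z')]

def is_likely_typo_py_alt (actual : String) (expected : String) : Bool :=
  let a := actual.toList
  let e := expected.toList
  if a.length ≠ e.length then false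
  else
    -- diffs = [(a, e) for a, e in zip(actual, expected) if a != e]
    let diffs := (a.zip e).filter (fun p => p.1 != p.2)
    -- len(diffs) == 1 and diffs[0] in typo_set
    match diffs with
    | [p] => decide (p ∈ typoSetB)
    | _ => false

-- ===== PRECONDITION & SPEC =====
def Spec_is_likely_typo_py (actual : String) (expected : String) (out : Bool) : Prop := out = is_likely_typo_py_alt actual expected
instance (actual : String) (expected : String) (out : Bool) : Decidable (Spec_is_likely_typo_py actual expected out) := by unfold Spec_is_likely_typo_py; infer_instance

-- ===== CLAIM (what is proved, stated in full; the proofs are below) =====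
def Claim_equal_is_likely_typo_py : Prop := ∀ (actual : String) (expected : String), Dom_is_likely_typo_py actual expected → Spec_is_likely_typo_py actual expected (is_likely_typo_py actual expected)

-- ===== LEMMAS AND PROOFS =====

-- shifting a common head past A's loop: the index moves by one, the removal-slices
-- gain an equal head if x = y, and can never be equal if x ≠ y
theorem typoLoopA_cons (x y : Char) (a e : List Char) :
    ∀ (as es : List Char) (i : Nat),
      typoLoopA (x :: a) (y :: e) (i+1) as es =
        if x = y then typoLoopA a e i as es else false := by
  intro as
  induction as with
  | nil => intro es i; cases es <;> simp [typoLoopA]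
  | cons ac as ih =>
    intro es i
    cases es with
    | nil => simp [typoLoopA]
    | cons ec es =>
      simp only [typoLoopA, ih, List.take_succ_cons, List.drop_succ_cons, List.cons_append]
      by_cases hxy : x = y
      · subst hxy; simp
      · simp [hxy]

-- no mismatches in the zip plus equal lengths means the lists are equal
theorem filter_zip_nil_iff (a : List Char) :
    ∀ e : List Char,
      ((a.zip e).filter (fun p => p.1 != p.2) = [] ∧ a.length = e.length) ↔ a = e := by
  induction a with
  | nil => intro e; cases e <;> simp
  | cons x a ih =>
    intro e
    cases e with
    | nil => simp
    | cons y e =>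
      by_cases hxy : x = y
      · subst hxy; simpa using ih e
      · simp [hxy]

theorem filter_zip_self (a : List Char) :
    (a.zip a).filter (fun p => p.1 != p.2) = [] := by
  induction a with
  | nil => rfl
  | cons x a ih => simp [ih]

theorem main_lists (a : List Char) :
    ∀ e : List Char,
      typoLoopA a e 0 a e =
        (if a.length ≠ e.length then false
         else match (a.zip e).filter (fun p => p.1 != p.2) with
              | [p] => decide (p ∈ typoSetB)
              | _ => false) := by
  induction a with
  | nil => intro e; cases e <;> simp [typoLoopA]
  | cons x a ih =>
    intro e
    cases e with
    | nil => simp [typoLoopA]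
    | cons y e =>
      by_cases hxy : x = y
      · subst hxy
        have hshift := typoLoopA_cons x x a e a e 0
        simp only [typoLoopA, List.take_zero, List.drop_succ_cons, List.drop_zero,
          List.nil_append, hshift, ih e]
        by_cases hlen : a.length = e.length
        · simp [hlen]
        · simp [hlen]
      · have hshift := typoLoopA_cons x y a e a e 0
        simp only [typoLoopA, List.take_zero, List.drop_succ_cons, List.drop_zero,
          List.nil_append, hshift, if_neg hxy, Bool.or_false]
        by_cases hae : a = e
        · subst hae
          simp [hxy, filter_zip_self, typoPairsA, typoSetB, Prod.ext_iff]
        · have hne : ¬ ((a.zip e).filter (fun p => p.1 != p.2) = [] ∧ a.length = e.length) := by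
            rw [filter_zip_nil_iff]; exact hae
          by_cases hlen : a.length = e.length
          · have hfil : (a.zip e).filter (fun p => p.1 != p.2) ≠ [] := by
              intro h; exact hne ⟨h, hlen⟩
            simp [hxy, hae, hlen]
            cases hf : (a.zip e).filter (fun p => p.1 != p.2) with
            | nil => exact absurd hf hfil
            | cons q qs => simp
          · simp [hxy, hae]
            omega

-- ===== VERDICT (by name: the statement is the Claim_ definition above) =====
theorem is_likely_typo_py_spec : Claim_equal_is_likely_typo_py := by
  intro actual expected _
  unfold Spec_is_likely_typo_py is_likely_typo_py is_likely_typo_py_alt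
  exact main_lists actual.toList expected.toList
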